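-- pv_equiv track=rewrite | github.com/Staque/TDTSP | code/refined/solvers/tsp_quanfluence_solver.py | _decode_solution
-- ===== SOURCE A (Python) =====
-- from typing import List, Dict, Optional, Tuple, Any
--
-- def _decode_solution(result_vector: List[int], n: int) -> List[int]:
--     """Decode solution vector to tour"""
--     tour = [None] * n
--
--     for idx, bit in enumerate(result_vector):
--         if bit == 1:
--             city = idx // n
--             position = idx % n
--             if position < n and city < n:
--                 if tour[position] is None:
--                     tour[position] = city
--
--     # Fill missing positions
--     if None in tour:
--         used_cities = set(c for c in tour if c is not None)
--         missing_cities = [c for c in range(n) if c not in used_cities]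
--         for i, pos in enumerate(tour):
--             if pos is None and missing_cities:
--                 tour[i] = missing_cities.pop(0)
--
--     if None in tour or len(set(tour)) != n:
--         return []
--
--     return tour
-- ===== SOURCE B (Python) =====
-- def _decode_solution(result_vector, n):
--     """Decode solution vector to tour (position-outer column scan)."""
--     def pick(position):
--         city, idx = 0, position
--         while city < n and idx < len(result_vector):
--             if result_vector[idx] == 1:
--                 return city
--             city += 1
--             idx += n
--         return None
--
--     tour = [pick(p) for p in range(n)]
--     used = set(c for c in tour if c is not None)
--     missing = iter(c for c in range(n) if c not in used)
--     tour = [c if c is not None else next(missing, None) for c in tour]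
--     if None in tour or len(set(tour)) != n:
--         return []
--     return tour
-- ===== Notes on version B (the rewrite author's own statement) =====
-- stated objective: faster
-- what changed: Replaced A's single linear first-bit-wins scan over the whole vector (idx//n, idx%n per set bit, mutable slot table) by a position-outer column scan that walks each position's column and stops at the first set bit (so the vector is not fully traversed), plus an iterator/comprehension-based missing-fill instead of in-place mutation with pop(0).
-- crash fix: On inputs with n == 0 and a 1 bit in result_vector, A raises ZeroDivisionError (idx // n); B returns []. — e.g. on _decode_solution([1], 0): A raises ZeroDivisionError, B returns []
import Mathlib
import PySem

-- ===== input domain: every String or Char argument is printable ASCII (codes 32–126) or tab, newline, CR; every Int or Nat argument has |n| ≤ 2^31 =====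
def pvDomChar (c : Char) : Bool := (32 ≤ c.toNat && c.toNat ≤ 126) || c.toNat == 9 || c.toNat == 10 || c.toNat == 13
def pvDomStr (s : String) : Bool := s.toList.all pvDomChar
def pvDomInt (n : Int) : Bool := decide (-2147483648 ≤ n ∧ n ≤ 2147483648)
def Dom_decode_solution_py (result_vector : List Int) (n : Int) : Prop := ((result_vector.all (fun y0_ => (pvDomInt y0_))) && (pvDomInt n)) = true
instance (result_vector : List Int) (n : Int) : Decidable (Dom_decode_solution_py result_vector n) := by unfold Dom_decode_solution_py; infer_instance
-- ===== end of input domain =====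

-- B replaces A's single first-bit-wins scan over the whole vector by a position-outer
-- column scan that stops at the first set bit of each position (measured faster by the
-- timing run), with an iterator-based fill. Equality of RETURN values is what is proved.

-- ===== PORT A =====
def pyAstep (n : Int) (tour : List (Option Int)) (e : Int × Int) : List (Option Int) :=
  if e.2 = 1 then
    if PySem.Int.mod e.1 n < n ∧ PySem.Int.floordiv e.1 n < n then
      match PySem.List.pyGet? tour (PySem.Int.mod e.1 n) with
      | some none => PySem.List.pySetD tour (PySem.Int.mod e.1 n) (some (PySem.Int.floordiv e.1 n))
      | _ => tour
    else tour
  else tour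

def pyAfillStep (st : List (Option Int) × List Int) (pos : Option Int) : List (Option Int) × List Int :=
  match pos, st.2 with
  | none, m :: ms => (st.1 ++ [some m], ms)
  | p, _ => (st.1 ++ [p], st.2)

def decode_solution_py (result_vector : List Int) (n : Int) : List Int :=
  let tour := (PySem.List.enumerate result_vector 0).foldl (pyAstep n) (List.replicate n.toNat (none : Option Int))
  let tour2 :=
    if tour.contains none then
      let used : PySem.Set Int := PySem.Set.ofList (tour.filterMap id)
      let missing := (PySem.List.pyRange 0 n 1).filter (fun c => !(PySem.Set.contains used c))
      (tour.foldl pyAfillStep ([], missing)).1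
    else tour
  if tour2.contains none || PySem.Set.len (PySem.Set.ofList tour2) ≠ n then []
  else tour2.filterMap id

-- ===== PORT B =====
def pickLoop (result_vector : List Int) (n : Int) (city : Int) (idx : Int) : Option Int :=
  if _h : city < n ∧ idx < PySem.List.len result_vector then
    if PySem.List.pyGetD result_vector idx 0 = 1 then some city
    else pickLoop result_vector n (city + 1) (idx + n)
  else none
termination_by (n - city).toNat
decreasing_by omega

def pickB (result_vector : List Int) (n : Int) (position : Int) : Option Int :=
  pickLoop result_vector n 0 position

def pyBfillStep (st : List (Option Int) × List Int) (c : Option Int) : List (Option Int) × List Int :=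
  match c with
  | some city => (st.1 ++ [some city], st.2)
  | none =>
    match st.2 with
    | m :: ms => (st.1 ++ [some m], ms)
    | [] => (st.1 ++ [none], [])

def decode_solution_py_alt (result_vector : List Int) (n : Int) : List Int :=
  let tour := (PySem.List.pyRange 0 n 1).map (pickB result_vector n)
  let used : PySem.Set Int := PySem.Set.ofList (tour.filterMap id)
  let missing := (PySem.List.pyRange 0 n 1).filter (fun c => !(PySem.Set.contains used c))
  let tour2 := (tour.foldl pyBfillStep ([], missing)).1
  if tour2.contains none || PySem.Set.len (PySem.Set.ofList tour2) ≠ n then []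
  else tour2.filterMap id

-- ===== PRECONDITION & SPEC =====
-- Pre_ excludes exactly the inputs where Python A raises ZeroDivisionError: n == 0 with a 1 bit present.
def Pre_decode_solution_py (result_vector : List Int) (n : Int) : Prop :=
  ¬ (n = 0 ∧ (1 : Int) ∈ result_vector)
instance (result_vector : List Int) (n : Int) : Decidable (Pre_decode_solution_py result_vector n) := by
  unfold Pre_decode_solution_py; infer_instance

def pvWitness_decode_solution_py : List Int × Int := ([1, 0, 0, 1], 2)

-- On n == 0 with a 1 bit in result_vector, A raises ZeroDivisionError (idx // n); B returns [].
def Raises_decode_solution_py (result_vector : List Int) (n : Int) : Prop :=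
  n = 0 ∧ (1 : Int) ∈ result_vector
instance (result_vector : List Int) (n : Int) : Decidable (Raises_decode_solution_py result_vector n) := by
  unfold Raises_decode_solution_py; infer_instance

def pvRaiseWitness_decode_solution_py : List Int × Int := ([1], 0)
def pvRaiseWitnessOut_decode_solution_py : List Int := []

def Spec_decode_solution_py (result_vector : List Int) (n : Int) (out : List Int) : Prop := out = decode_solution_py_alt result_vector n
instance (result_vector : List Int) (n : Int) (out : List Int) : Decidable (Spec_decode_solution_py result_vector n out) := by unfold Spec_decode_solution_py; infer_instance

-- ===== CLAIM (what is proved, stated in full; the proofs are below) =====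
def Claim_equal_decode_solution_py : Prop := ∀ (result_vector : List Int) (n : Int), Dom_decode_solution_py result_vector n → Pre_decode_solution_py result_vector n → Spec_decode_solution_py result_vector n (decode_solution_py result_vector n)

def Claim_raises_decode_solution_py : Prop := (∀ (result_vector : List Int) (n : Int), Dom_decode_solution_py result_vector n → Raises_decode_solution_py result_vector n → ¬ Pre_decode_solution_py result_vector n) ∧ (Dom_decode_solution_py (pvRaiseWitness_decode_solution_py.1) (pvRaiseWitness_decode_solution_py.2) ∧ Raises_decode_solution_py (pvRaiseWitness_decode_solution_py.1) (pvRaiseWitness_decode_solution_py.2) ∧ decode_solution_py_alt (pvRaiseWitness_decode_solution_py.1) (pvRaiseWitness_decode_solution_py.2) = pvRaiseWitnessOut_decode_solution_py)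

-- ===== LEMMAS AND PROOFS =====

-- first city filled at position p by A's scan starting at flat index k
def ffA (N : Nat) (p : Nat) : List Int → Nat → Option Int
  | [], _ => none
  | b :: rest, k =>
    if b = 1 ∧ k % N = p ∧ k / N < N then some ((k / N : Nat) : Int) else ffA N p rest (k + 1)

theorem length_pyAstep (n : Int) (tour : List (Option Int)) (e : Int × Int) :
    (pyAstep n tour e).length = tour.length := by
  unfold pyAstep
  split_ifs <;> try rfl
  split <;> simp [PySem.List.length_pySetD]

theorem length_foldA (n : Int) (l : List (Int × Int)) (tour : List (Option Int)) :
    (l.foldl (pyAstep n) tour).length = tour.length := by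
  induction l generalizing tour with
  | nil => rfl
  | cons e l ih => simp [List.foldl_cons, ih, length_pyAstep]

theorem foldA_nil_tour (n : Int) (l : List (Int × Int)) :
    l.foldl (pyAstep n) [] = [] := by
  have h : ∀ e, pyAstep n [] e = [] := by
    intro e
    unfold pyAstep
    split_ifs <;> try rfl
    split <;> simp_all [PySem.List.pyGet?]
  induction l with
  | nil => rfl
  | cons e l ih => simp [List.foldl_cons, h, ih]

theorem key_fold (N : Nat) (hN : 0 < N) (vec : List Int) (k : Nat)
    (tour : List (Option Int)) (hlen : tour.length = N) (p : Nat) (hp : p < N) :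
    ((PySem.List.enumerate vec (k : Int)).foldl (pyAstep ((N : Nat) : Int)) tour).getD p none =
      (tour.getD p none).or (ffA N p vec k) := by
  induction vec generalizing k tour with
  | nil => simp [PySem.List.enumerate_nil, ffA]
  | cons b rest ih =>
    rw [PySem.List.enumerate_cons, List.foldl_cons]
    have hk1 : (k : Int) + 1 = ((k + 1 : Nat) : Int) := by push_cast; ring
    rw [hk1, ih (k + 1) _ (by rw [length_pyAstep]; exact hlen)]
    have hffa : ffA N p (b :: rest) k =
        if b = 1 ∧ k % N = p ∧ k / N < N then some ((k / N : Nat) : Int) else ffA N p rest (k + 1) := rfl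
    rw [hffa]
    by_cases hb : b = 1
    · by_cases hcN : k / N < N
      · have hqlt : k % N < N := Nat.mod_lt _ hN
        have hcond : ((k % N : Nat) : Int) < ((N : Nat) : Int) ∧ ((k / N : Nat) : Int) < ((N : Nat) : Int) :=
          ⟨by exact_mod_cast hqlt, by exact_mod_cast hcN⟩
        have hget : PySem.List.pyGet? tour ((k % N : Nat) : Int) = some (tour[k % N]'(by omega)) := by
          rw [PySem.List.pyGet?_natCast]
          exact List.getElem?_eq_getElem (by omega)
        cases hslot : tour[k % N]'(by omega) with
        | none =>
          have hstep : pyAstep ((N : Nat) : Int) tour (((k : Nat) : Int), b) =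
              tour.set (k % N) (some ((k / N : Nat) : Int)) := by
            simp only [pyAstep, PySem.Int.mod_natCast, PySem.Int.floordiv_natCast]
            rw [if_pos hb, if_pos hcond, hget, hslot]
            rw [PySem.List.pySetD_natCast]
          rw [hstep]
          by_cases hq : k % N = p
          · subst hq
            rw [List.getD_eq_getElem _ _ (by rw [List.length_set]; omega),
                List.getD_eq_getElem _ _ (by omega)]
            simp [hslot, hb, hcN]
          · have h1 : (tour.set (k % N) (some ((k / N : Nat) : Int))).getD p none = tour.getD p none := by
              simp [List.getD, hq]
            rw [h1, if_neg (by tauto)]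
        | some c' =>
          have hstep : pyAstep ((N : Nat) : Int) tour (((k : Nat) : Int), b) = tour := by
            simp only [pyAstep, PySem.Int.mod_natCast, PySem.Int.floordiv_natCast]
            rw [if_pos hb, if_pos hcond, hget, hslot]
          rw [hstep]
          by_cases hq : k % N = p
          · subst hq
            rw [if_pos ⟨hb, rfl, hcN⟩, List.getD_eq_getElem _ _ (by omega)]
            simp [hslot]
          · rw [if_neg (by tauto)]
      · have hstep : pyAstep ((N : Nat) : Int) tour (((k : Nat) : Int), b) = tour := by
          simp only [pyAstep, PySem.Int.mod_natCast, PySem.Int.floordiv_natCast]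
          rw [if_pos hb, if_neg (by intro h; exact hcN (by exact_mod_cast h.2))]
        rw [hstep, if_neg (by tauto)]
    · have hstep : pyAstep ((N : Nat) : Int) tour (((k : Nat) : Int), b) = tour := by
        simp [pyAstep, hb]
      rw [hstep, if_neg (by tauto)]

theorem find?_congr_mem {α : Type} (l : List α) (p q : α → Bool) (h : ∀ x ∈ l, p x = q x) :
    l.find? p = l.find? q := by
  induction l with
  | nil => rfl
  | cons a l ih =>
    simp only [List.find?_cons, h a (by simp)]
    split
    · rfl
    · exact ih fun x hx => h x (by simp [hx])

theorem find?_range_first (N : Nat) (P : Nat → Bool) (c0 : Nat) (hc : c0 < N) (hP : P c0 = true)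
    (hmin : ∀ x < c0, P x = false) : (List.range N).find? P = some c0 := by
  have hsplit : List.range N = List.range c0 ++ (List.range (N - c0)).map (c0 + ·) := by
    rw [← List.range_add]
    congr 1
    omega
  rw [hsplit, List.find?_append, List.find?_eq_none.mpr (by
    intro x hx
    rw [List.mem_range] at hx
    simp [hmin x hx])]
  have : N - c0 = (N - c0 - 1) + 1 := by omega
  rw [this, List.range_succ_eq_map, List.map_cons]
  simp only [List.find?_cons, Nat.add_zero, hP]
  rfl

theorem ffA_eq_find (N : Nat) (hN : 0 < N) (p : Nat) (hp : p < N) (vec : List Int) (k : Nat) :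
    ffA N p vec k =
      ((List.range N).find? (fun c =>
        decide (k ≤ c * N + p) && decide (c * N + p < k + vec.length) &&
          (vec.getD (c * N + p - k) 0 == 1))).map (fun c => (c : Int)) := by
  induction vec generalizing k with
  | nil =>
    rw [show ffA N p [] k = none from rfl]
    rw [List.find?_eq_none.mpr ?_]
    · rfl
    · intro x hx
      simp only [List.length_nil, List.getD_nil, Bool.and_eq_true, decide_eq_true_eq]
      rintro ⟨⟨h1, h2⟩, -⟩
      omega
  | cons b rest ih =>
    have hffa : ffA N p (b :: rest) k =
        if b = 1 ∧ k % N = p ∧ k / N < N then some ((k / N : Nat) : Int) else ffA N p rest (k + 1) := rfl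
    rw [hffa]
    by_cases hC : b = 1 ∧ k % N = p ∧ k / N < N
    · rw [if_pos hC]
      obtain ⟨hb, hq, hc⟩ := hC
      have hk : k / N * N + p = k := by
        have h := Nat.div_add_mod k N
        rw [Nat.mul_comm] at h
        omega
      rw [find?_range_first N _ (k / N) hc ?hP ?hmin]
      · rfl
      case hP =>
        simp only [hk, Bool.and_eq_true, decide_eq_true_eq]
        refine ⟨⟨le_refl _, by simp⟩, ?_⟩
        simp [hb]
      case hmin =>
        intro x hx
        have h1 : x * N + N ≤ k / N * N := by
          calc x * N + N = (x + 1) * N := by ring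
          _ ≤ k / N * N := Nat.mul_le_mul_right _ hx
        have h2 : ¬ (k ≤ x * N + p) := by omega
        simp [h2]
    · rw [if_neg hC, ih (k + 1)]
      rw [find?_congr_mem (List.range N) _
        (fun c => decide (k ≤ c * N + p) && decide (c * N + p < k + (b :: rest).length) &&
          ((b :: rest).getD (c * N + p - k) 0 == 1)) ?_]
      intro x hx
      rw [List.mem_range] at hx
      rcases Nat.lt_trichotomy (x * N + p) k with hlt | heq | hgt
      · have h1 : ¬ (k ≤ x * N + p) := by omega
        have h2 : ¬ (k + 1 ≤ x * N + p) := by omega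
        simp [h1, h2]
      · have hq : k % N = p := by
          rw [← heq, Nat.mul_comm, Nat.mul_add_mod]
          exact Nat.mod_eq_of_lt hp
        have hdv : k / N = x := by
          rw [← heq, Nat.mul_comm, Nat.mul_add_div hN, Nat.div_eq_of_lt hp]
          omega
        have hb : b ≠ 1 := by intro hb; exact hC ⟨hb, hq, by omega⟩
        simp [heq, hb]
      · have h1 : k ≤ x * N + p := by omega
        have h2 : k + 1 ≤ x * N + p := by omega
        have h3 : x * N + p - k = (x * N + p - (k + 1)) + 1 := by omega
        simp only [h1, h2, decide_true, Bool.true_and, List.length_cons, h3, List.getD_cons_succ]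
        have : x * N + p < k + (rest.length + 1) ↔ x * N + p < k + 1 + rest.length := by omega
        simp [this]

theorem pickLoop_eq_find (vec : List Int) (n : Int) (hn : 0 < n) (p : Int)
    (c : Int) (hc : 0 ≤ c) (idx : Int) (hidx : idx = c * n + p) :
    pickLoop vec n c idx =
      (PySem.List.pyRange c n 1).find? (fun city =>
        decide (city * n + p < PySem.List.len vec) &&
        (PySem.List.pyGetD vec (city * n + p) 0 == 1)) := by
  subst hidx
  generalize hm : (n - c).toNat = m
  induction m generalizing c with
  | zero =>
    have hcn : ¬ (c < n) := by omega
    rw [pickLoop, dif_neg (by tauto)]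
    rw [PySem.List.pyRange_one_eq_nil (by omega)]
    rfl
  | succ m ih =>
    have hcn : c < n := by omega
    by_cases hidx : c * n + p < PySem.List.len vec
    · rw [pickLoop, dif_pos ⟨hcn, hidx⟩]
      rw [PySem.List.pyRange_one_cons hcn, List.find?_cons]
      by_cases hbit : PySem.List.pyGetD vec (c * n + p) 0 = 1
      · rw [if_pos hbit]
        simp only [PySem.List.len_eq] at hidx
        simp [hbit, hidx]
      · rw [if_neg hbit]
        have hcond : (decide (c * n + p < PySem.List.len vec) &&
            (PySem.List.pyGetD vec (c * n + p) 0 == 1)) = false := by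
          simp [hbit]
        rw [hcond]
        rw [show c * n + p + n = (c + 1) * n + p by ring]
        exact ih (c + 1) (by omega) (by omega)
    · rw [pickLoop, dif_neg (by tauto)]
      rw [List.find?_eq_none.mpr ?_]
      intro x hx
      rw [PySem.List.mem_pyRange_one] at hx
      have hxn : c * n + p ≤ x * n + p := by
        have : c * n ≤ x * n := Int.mul_le_mul_of_nonneg_right hx.1 hn.le
        omega
      have hno : ¬ (x * n + p < PySem.List.len vec) := by omega
      simp only [PySem.List.len_eq] at hno
      simp [hno]

theorem pickB_eq (vec : List Int) (N : Nat) (hN : 0 < N) (p : Nat) (hp : p < N) :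
    pickB vec ((N : Nat) : Int) ((p : Nat) : Int) = ffA N p vec 0 := by
  rw [ffA_eq_find N hN p hp vec 0]
  unfold pickB
  rw [pickLoop_eq_find vec ((N : Nat) : Int) (by exact_mod_cast hN) ((p : Nat) : Int)
    0 le_rfl ((p : Nat) : Int) (by ring)]
  rw [PySem.List.pyRange_one, List.find?_map]
  have hpred : ((fun city : Int => decide (city * ((N : Nat) : Int) + ((p : Nat) : Int) < PySem.List.len vec) &&
        (PySem.List.pyGetD vec (city * ((N : Nat) : Int) + ((p : Nat) : Int)) 0 == 1)) ∘
        (fun k : Nat => (0 : Int) + (k : Int))) =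
      (fun c : Nat => decide (0 ≤ c * N + p) && decide (c * N + p < 0 + vec.length) &&
        (vec.getD (c * N + p - 0) 0 == 1)) := by
    funext c
    have hc : ((0 : Int) + (c : Int)) * ((N : Nat) : Int) + ((p : Nat) : Int) = ((c * N + p : Nat) : Int) := by
      push_cast; ring
    simp only [Function.comp, hc, PySem.List.pyGetD_natCast, PySem.List.len_eq]
    have hlt : ((c : Int) * ((N : Nat) : Int) + ((p : Nat) : Int) < ((vec.length : Nat) : Int)) ↔
        (c * N + p < vec.length) := by
      constructor <;> intro h <;> exact_mod_cast h
    simp [hlt]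
  rw [hpred]
  have hmap : (fun k : Nat => (0 : Int) + (k : Int)) = (fun c : Nat => (c : Int)) := by
    funext c; ring
  rw [hmap]
  simp only [sub_zero, Int.toNat_natCast]
  generalize List.find? _ (List.range N) = o
  cases o <;> rfl

theorem tour_eq (vec : List Int) (n : Int) (hn : 0 < n) :
    (PySem.List.enumerate vec 0).foldl (pyAstep n) (List.replicate n.toNat (none : Option Int)) =
      (PySem.List.pyRange 0 n 1).map (pickB vec n) := by
  lift n to Nat using hn.le with N hNn
  have hN : 0 < N := by exact_mod_cast hn
  have hrange : PySem.List.pyRange 0 ((N : Nat) : Int) 1 = (List.range N).map (fun k : Nat => ((k : Nat) : Int)) := by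
    rw [PySem.List.pyRange_one]
    simp
  apply List.ext_getElem
  · rw [length_foldA]
    simp [hrange]
  · intro i h1 h2
    have hiN : i < N := by
      rw [length_foldA] at h1
      simpa using h1
    have hL : ((PySem.List.enumerate vec ((0 : Nat) : Int)).foldl (pyAstep ((N : Nat) : Int))
        (List.replicate ((N : Nat) : Int).toNat (none : Option Int))).getD i none = ffA N i vec 0 := by
      rw [key_fold N hN vec 0 _ (by simp) i hiN]
      simp
    simp only [Nat.cast_zero] at hL
    rw [List.getD_eq_getElem _ _ h1] at hL
    rw [hL, List.getElem_map, PySem.List.getElem_pyRange_one]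
    rw [show (0 : Int) + (i : Int) = ((i : Nat) : Int) by ring]
    exact (pickB_eq vec N hN i hiN).symm

theorem fill_step_eq : pyAfillStep = pyBfillStep := by
  funext st pos
  rcases st with ⟨acc, ms⟩
  cases pos <;> cases ms <;> rfl

theorem fill_no_none (t : List (Option Int)) (acc : List (Option Int)) (ms : List Int)
    (h : t.contains (none : Option Int) = false) :
    (t.foldl pyBfillStep (acc, ms)).1 = acc ++ t := by
  induction t generalizing acc ms with
  | nil => simp
  | cons c t ih =>
    cases c with
    | none => simp at h
    | some city =>
      simp only [List.contains_cons] at h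
      simp only [List.foldl_cons, pyBfillStep]
      rw [ih _ _ (by simpa using h)]
      simp

-- ===== VERDICT (by name: the statement is the Claim_ definition above) =====
theorem decode_solution_py_spec : Claim_equal_decode_solution_py := by
  intro vec n hdom hpre
  unfold Spec_decode_solution_py decode_solution_py decode_solution_py_alt
  by_cases hn : 0 < n
  · rw [tour_eq vec n hn]
    set tour := (PySem.List.pyRange 0 n 1).map (pickB vec n) with htour
    by_cases hc : tour.contains (none : Option Int)
    · simp only [hc, if_true, fill_step_eq]
    · rw [Bool.not_eq_true] at hc
      dsimp only
      rw [fill_no_none _ _ _ hc, List.nil_append]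
      simp only [hc, Bool.false_eq_true, if_false]
  · have h1 : n.toNat = 0 := by omega
    have h2 : PySem.List.pyRange 0 n 1 = [] := PySem.List.pyRange_one_eq_nil (by omega)
    rw [h1, h2]
    simp [foldA_nil_tour]

@[simp] theorem decode_solution_py_raises : Claim_raises_decode_solution_py := by
  unfold Claim_raises_decode_solution_py
  constructor
  · intro vec n _ hr
    unfold Pre_decode_solution_py Raises_decode_solution_py at *
    simp_all
  · exact ⟨by decide, by decide, by decide⟩
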